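-- pv_equiv track=rewrite | github.com/tutormvetrov/ticket-exam-trainer | app/release_guardrails.py | find_case_collisions
-- ===== SOURCE A (Python) =====
-- from collections import defaultdict
--
-- def find_case_collisions(paths: list[str]) -> list[tuple[str, ...]]:
--     groups: dict[str, list[str]] = defaultdict(list)
--     for path in paths:
--         groups[path.casefold()].append(path)
--     collisions = [
--         tuple(sorted(group)) for group in groups.values() if len(group) > 1
--     ]
--     return sorted(collisions)
-- ===== SOURCE B (Python) =====
-- def find_case_collisions(paths: list[str]) -> list[tuple[str, ...]]:
--     # No dict grouping: dedup the casefolded keys, then one filter pass per key.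
--     out = []
--     for key in dict.fromkeys(p.casefold() for p in paths):
--         group = sorted(p for p in paths if p.casefold() == key)
--         if len(group) > 1:
--             out.append(tuple(group))
--     return sorted(out)
-- ===== Notes on version B (the rewrite author's own statement) =====
-- stated objective: simpler
-- what changed: Replaces the defaultdict one-pass hash grouping by deduplicating the casefolded keys and making one filter scan over the input per distinct key, with no dict at all.
import Mathlib
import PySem

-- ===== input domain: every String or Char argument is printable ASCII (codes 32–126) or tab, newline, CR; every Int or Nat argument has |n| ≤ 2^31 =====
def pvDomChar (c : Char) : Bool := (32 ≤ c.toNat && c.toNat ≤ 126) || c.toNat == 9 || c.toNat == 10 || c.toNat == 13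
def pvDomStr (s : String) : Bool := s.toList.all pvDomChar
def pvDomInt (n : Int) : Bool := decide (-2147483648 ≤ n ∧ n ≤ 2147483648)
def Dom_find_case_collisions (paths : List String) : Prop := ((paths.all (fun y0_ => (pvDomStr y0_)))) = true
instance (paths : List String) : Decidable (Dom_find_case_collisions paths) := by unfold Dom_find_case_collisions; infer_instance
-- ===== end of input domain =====

-- B is simpler: no defaultdict grouping — dedup the casefolded keys, one filter scan per key.
-- str.casefold is ported as PySem.Str.lower, exact on the ASCII domain Dom_ (casefold = lower there).

-- ===== PORT A =====
def find_case_collisions (paths : List String) : List (List String) :=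
  let groups : PySem.Dict String (List String) :=
    paths.foldl (fun d path => d.modify (PySem.Str.lower path) [] (fun g => g ++ [path]))
      PySem.Dict.empty
  let collisions : List (List String) :=
    ((PySem.Dict.values groups).filter (fun g => decide (g.length > 1))).map
      (fun g => PySem.List.sorted g (fun x => x) false)
  PySem.List.sorted collisions (fun x => x) false

-- ===== PORT B =====
def find_case_collisions_alt (paths : List String) : List (List String) :=
  let out : List (List String) :=
    (PySem.List.dedup (paths.map PySem.Str.lower)).foldl
      (fun acc key =>
        let group := PySem.List.sorted (paths.filter (fun p => PySem.Str.lower p == key))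
          (fun x => x) false
        if group.length > 1 then acc ++ [group] else acc) []
  PySem.List.sorted out (fun x => x) false

-- ===== PRECONDITION & SPEC =====
def Spec_find_case_collisions (paths : List String) (out : List (List String)) : Prop := out = find_case_collisions_alt paths
instance (paths : List String) (out : List (List String)) : Decidable (Spec_find_case_collisions paths out) := by unfold Spec_find_case_collisions; infer_instance

-- ===== CLAIM (what is proved, stated in full; the proofs are below) =====
def Claim_equal_find_case_collisions : Prop := ∀ (paths : List String), Dom_find_case_collisions paths → Spec_find_case_collisions paths (find_case_collisions paths)

-- ===== LEMMAS AND PROOFS =====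

-- A's dict after the grouping loop: its keys are the deduped casefolded paths …
theorem keys_groups (paths : List String) :
    (paths.foldl (fun d path => d.modify (PySem.Str.lower path) [] (fun g => g ++ [path]))
      PySem.Dict.empty).keys = PySem.List.dedup (paths.map PySem.Str.lower) := by
  rw [PySem.Dict.keys_foldl_modify_key paths PySem.Str.lower [] (fun _ path => fun g => g ++ [path])]
  rw [PySem.List.dedup_eq_ofList]
  simp [PySem.Set.update_nil_left]

-- … and the group stored under key k is the filter of paths with that casefold.
theorem getD_groups (paths : List String) (k : String) :
    (paths.foldl (fun d path => d.modify (PySem.Str.lower path) [] (fun g => g ++ [path]))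
      PySem.Dict.empty).getD k [] = paths.filter (fun p => PySem.Str.lower p == k) := by
  have h : paths.foldl (fun d path => d.modify (PySem.Str.lower path) [] (fun g => g ++ [path]))
      PySem.Dict.empty
      = (paths.map (fun p => (PySem.Str.lower p, p))).foldl
          (fun d q => d.modify q.1 [] (fun g => g ++ [q.2])) PySem.Dict.empty := by
    rw [List.foldl_map]
  rw [h, PySem.Dict.getD_foldl_modify_append]
  simp [List.filter_map, Function.comp_def]

theorem pre_sort_eq (paths : List String) :
    ((PySem.Dict.values (paths.foldl
        (fun d path => d.modify (PySem.Str.lower path) [] (fun g => g ++ [path]))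
        PySem.Dict.empty)).filter (fun g => decide (g.length > 1))).map
      (fun g => PySem.List.sorted g (fun x => x) false)
    = (PySem.List.dedup (paths.map PySem.Str.lower)).foldl
        (fun acc key =>
          let group := PySem.List.sorted (paths.filter (fun p => PySem.Str.lower p == key))
            (fun x => x) false
          if group.length > 1 then acc ++ [group] else acc) [] := by
  have hnd : (paths.foldl
      (fun d path => d.modify (PySem.Str.lower path) [] (fun g => g ++ [path]))
      PySem.Dict.empty).keys.Nodup := by
    rw [keys_groups, PySem.List.dedup_eq_ofList]; exact PySem.Set.nodup_ofList _
  have hvals : PySem.Dict.values (paths.foldl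
      (fun d path => d.modify (PySem.Str.lower path) [] (fun g => g ++ [path]))
      PySem.Dict.empty)
      = (paths.foldl (fun d path => d.modify (PySem.Str.lower path) [] (fun g => g ++ [path]))
          PySem.Dict.empty).keys.map (fun k =>
            (paths.foldl (fun d path => d.modify (PySem.Str.lower path) [] (fun g => g ++ [path]))
              PySem.Dict.empty).getD k []) := by
    rw [PySem.Dict.values, PySem.Dict.items_eq_map_keys _ hnd [], List.map_map]
    simp [Function.comp_def]
  rw [PySem.List.foldl_append_ite
        (p := fun key => (PySem.List.sorted (paths.filter (fun p => PySem.Str.lower p == key))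
              (fun x => x) false).length > 1)
        (f := fun key => PySem.List.sorted (paths.filter (fun p => PySem.Str.lower p == key))
              (fun x => x) false)]
  rw [hvals, keys_groups, List.filter_map, List.map_map, List.nil_append]
  simp only [Function.comp_def, getD_groups]
  refine congrArg _ (List.filter_congr fun k _ => ?_)
  simp [(PySem.List.sorted_perm (paths.filter (fun p => PySem.Str.lower p == k))
    (fun x => x) false).length_eq]

-- ===== VERDICT (by name: the statement is the Claim_ definition above) =====
theorem find_case_collisions_spec : Claim_equal_find_case_collisions := by
  intro paths _
  show find_case_collisions paths = find_case_collisions_alt paths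
  dsimp only [find_case_collisions, find_case_collisions_alt]
  rw [pre_sort_eq]
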